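-- pv_equiv track=rewrite | github.com/frozendrpepper/ML_Project | main.py | color_separator
-- ===== SOURCE A (Python) =====
-- def color_separator(color_list):
--     '''The function separates color into main and sub colors'''
--     main_color, sub_color = [], []
--     for color in color_list:
--         if color.count('/') == 0:
--             main_color.append(color)
--             sub_color.append('NA')
--         elif color.count('/') == 1:
--             temp_color_list = color.split('/')
--             main_color.append(temp_color_list[0])
--             sub_color.append(temp_color_list[1])
--     return main_color, sub_color
-- ===== SOURCE B (Python) =====
-- def color_separator(color_list):
--     '''Divide and conquer: split the list in half, solve each half, concatenate.'''
--     n = len(color_list)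
--     if n == 0:
--         return [], []
--     if n == 1:
--         parts = color_list[0].split('/')
--         if len(parts) == 1:
--             return [color_list[0]], ['NA']
--         if len(parts) == 2:
--             return [parts[0]], [parts[1]]
--         return [], []
--     mid = n // 2
--     left_main, left_sub = color_separator(color_list[:mid])
--     right_main, right_sub = color_separator(color_list[mid:])
--     return left_main + right_main, left_sub + right_sub
-- ===== Notes on version B (the rewrite author's own statement) =====
-- stated objective: alternative
-- what changed: B replaces A's single left-to-right loop with two parallel append accumulators by a divide-and-conquer recursion: split the list in half, solve each half recursively (base cases: empty list and one color, dispatched on len(color.split('/'))), and concatenate the half-results.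
import Mathlib
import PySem

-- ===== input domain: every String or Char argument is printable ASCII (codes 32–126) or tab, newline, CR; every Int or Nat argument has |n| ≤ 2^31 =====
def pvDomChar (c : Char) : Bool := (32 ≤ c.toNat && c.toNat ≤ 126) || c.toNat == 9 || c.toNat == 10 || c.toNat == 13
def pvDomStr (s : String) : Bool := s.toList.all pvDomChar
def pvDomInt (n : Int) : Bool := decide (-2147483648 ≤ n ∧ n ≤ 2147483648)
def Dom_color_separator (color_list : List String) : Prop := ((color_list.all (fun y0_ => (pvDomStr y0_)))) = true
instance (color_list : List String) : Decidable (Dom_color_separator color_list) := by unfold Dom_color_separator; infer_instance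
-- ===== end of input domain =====

-- B replaces A's single left-to-right loop with a divide-and-conquer recursion
-- (halve the list, solve each half, concatenate) — objective: alternative decomposition.

-- ===== PORT A =====
-- the loop body of A (count('/') = 1 guarantees split has exactly two pieces, so the getD defaults
-- are never used; split? is none only for an empty separator, so getD [] is exact here)
def pvStep (acc : List String × List String) (color : String) : List String × List String :=
  if PySem.Str.count color "/" = 0 then
    (acc.1 ++ [color], acc.2 ++ ["NA"])
  else if PySem.Str.count color "/" = 1 then
    let temp_color_list := (PySem.Str.split? color "/").getD []
    (acc.1 ++ [temp_color_list.getD 0 ""], acc.2 ++ [temp_color_list.getD 1 ""])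
  else acc

def color_separator (color_list : List String) : List String × List String :=
  color_list.foldl pvStep ([], [])

-- ===== PORT B =====
-- divide and conquer: base cases length 0 and 1, otherwise recurse on the two halves
def color_separator_alt (color_list : List String) : List String × List String :=
  if h0 : color_list.length = 0 then ([], [])
  else if h1 : color_list.length = 1 then
    let c := PySem.List.pyGetD color_list 0 ""
    let parts := (PySem.Str.split? c "/").getD []
    if parts.length = 1 then ([c], ["NA"])
    else if parts.length = 2 then ([parts.getD 0 ""], [parts.getD 1 ""])
    else ([], [])
  else
    let mid := color_list.length / 2
    let left := color_separator_alt (PySem.List.slice color_list none (some (mid : Int)))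
    let right := color_separator_alt (PySem.List.slice color_list (some (mid : Int)) none)
    (left.1 ++ right.1, left.2 ++ right.2)
termination_by color_list.length
decreasing_by
  · rw [PySem.List.slice_to_natCast]; simp; omega
  · rw [PySem.List.slice_from_natCast]; simp; omega

-- ===== PRECONDITION & SPEC =====
def Spec_color_separator (color_list : List String) (out : List String × List String) : Prop := out = color_separator_alt color_list
instance (color_list : List String) (out : List String × List String) : Decidable (Spec_color_separator color_list out) := by unfold Spec_color_separator; infer_instance

-- ===== CLAIM (what is proved, stated in full; the proofs are below) =====
def Claim_equal_color_separator : Prop := ∀ (color_list : List String), Dom_color_separator color_list → Spec_color_separator color_list (color_separator color_list)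

-- ===== LEMMAS AND PROOFS =====

-- the common per-element behaviour: some (main, sub) for a kept color, none for a dropped one
def pvPair (c : String) : Option (String × String) :=
  let parts := (PySem.Str.split? c "/").getD []
  if parts.length = 1 then some (c, "NA")
  else if parts.length = 2 then some (parts.getD 0 "", parts.getD 1 "")
  else none

lemma pv_count_go (a : Char) (l : List Char) (fuel acc : Nat) (h : l.length ≤ fuel) :
    PySem.Chars.count.go [a] fuel l acc = acc + l.count a := by
  induction l generalizing fuel acc with
  | nil => cases fuel <;> simp [PySem.Chars.count.go]
  | cons c t ih =>
    cases fuel with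
    | zero => simp at h
    | succ f =>
      simp only [PySem.Chars.count.go]
      by_cases hc : a = c
      · subst hc
        rw [if_pos (by simp)]
        simp only [List.length_cons, List.length_nil, List.drop_succ_cons, List.drop_zero]
        rw [ih f (acc + 1) (by simpa using h), List.count_cons_self]
        omega
      · rw [if_neg (by simp [hc])]
        have hca : (c == a) = false := by simp [Ne.symm hc]
        rw [ih f acc (by simpa using h)]
        simp [List.count_cons, hca]

lemma pv_splitOn_go_length (a : Char) (l : List Char) (fuel : Nat) (cur : List Char)
    (acc : List (List Char)) (h : l.length ≤ fuel) :
    (PySem.Chars.splitOn.go [a] fuel l cur acc).length = acc.length + 1 + l.count a := by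
  induction l generalizing fuel cur acc with
  | nil => cases fuel <;> simp [PySem.Chars.splitOn.go]
  | cons c t ih =>
    cases fuel with
    | zero => simp at h
    | succ f =>
      simp only [PySem.Chars.splitOn.go]
      by_cases hc : a = c
      · subst hc
        rw [if_pos (by simp)]
        simp only [List.length_cons, List.length_nil, List.drop_succ_cons, List.drop_zero]
        rw [ih f [] (cur.reverse :: acc) (by simpa using h), List.count_cons_self]
        simp
        omega
      · rw [if_neg (by simp [hc])]
        have hca : (c == a) = false := by simp [Ne.symm hc]
        rw [ih f (c :: cur) acc (by simpa using h)]
        simp [List.count_cons, hca]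

-- bridge at the character level: len(l.split('/')) = l.count('/') + 1
lemma pv_chars_splitOn_length (a : Char) (l : List Char) :
    (PySem.Chars.splitOn l [a]).length = PySem.Chars.count l [a] + 1 := by
  unfold PySem.Chars.splitOn PySem.Chars.count
  rw [pv_splitOn_go_length a l (l.length + 1) [] [] (by omega)]
  simp only [List.isEmpty_cons]
  rw [pv_count_go a l l.length 0 (le_refl _)]
  simp
  omega

-- bridge: len(color.split('/')) = color.count('/') + 1
lemma pv_parts_length (c : String) :
    ((PySem.Str.split? c "/").getD []).length = PySem.Str.count c "/" + 1 := by
  have hsep : ("/" : String).toList = ['/'] := rfl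
  simp [PySem.Str.split?, PySem.Chars.split?, PySem.Str.count, hsep,
    pv_chars_splitOn_length]

lemma pv_step_pair (acc : List String × List String) (c : String) :
    pvStep acc c = match pvPair c with
      | some (m, s) => (acc.1 ++ [m], acc.2 ++ [s])
      | none => acc := by
  unfold pvStep pvPair
  have hp := pv_parts_length c
  by_cases h0 : PySem.Str.count c "/" = 0
  · have hl : ((PySem.Str.split? c "/").getD []).length = 1 := by omega
    rw [if_pos h0, if_pos hl]
  · by_cases h1 : PySem.Str.count c "/" = 1
    · have hl : ((PySem.Str.split? c "/").getD []).length = 2 := by omega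
      rw [if_neg h0, if_pos h1, if_neg (by omega), if_pos hl]
    · rw [if_neg h0, if_neg h1, if_neg (by omega), if_neg (by omega)]

lemma pv_foldl_eq (l : List String) (m s : List String) :
    l.foldl pvStep (m, s)
    = (m ++ (l.filterMap pvPair).map Prod.fst, s ++ (l.filterMap pvPair).map Prod.snd) := by
  induction l generalizing m s with
  | nil => simp
  | cons c t ih =>
    rw [List.foldl_cons, pv_step_pair, List.filterMap_cons]
    cases hc : pvPair c with
    | none => simp [ih]
    | some p => cases p with
      | mk a b => simp [ih]

lemma pv_alt_eq (n : Nat) (l : List String) (hn : l.length = n) :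
    color_separator_alt l
    = ((l.filterMap pvPair).map Prod.fst, (l.filterMap pvPair).map Prod.snd) := by
  induction n using Nat.strong_induction_on generalizing l with
  | _ n ih =>
    rw [color_separator_alt.eq_def]
    by_cases h0 : l.length = 0
    · obtain rfl := List.length_eq_zero_iff.mp h0
      simp
    · by_cases h1 : l.length = 1
      · obtain ⟨c, rfl⟩ := List.length_eq_one_iff.mp h1
        simp only [dif_neg h0, dif_pos h1]
        have hc : PySem.List.pyGetD [c] (0 : Int) "" = c := by
          simp [PySem.List.pyGetD]
        simp only [hc, List.filterMap_cons, List.filterMap_nil]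
        unfold pvPair
        split_ifs <;> simp_all
      · simp only [dif_neg h0, dif_neg h1]
        rw [PySem.List.slice_to_natCast, PySem.List.slice_from_natCast]
        have hm0 : 1 ≤ l.length / 2 := by omega
        have e1 := ih (l.take (l.length / 2)).length
          (by simp; omega) (l.take (l.length / 2)) rfl
        have e2 := ih (l.drop (l.length / 2)).length
          (by simp; omega) (l.drop (l.length / 2)) rfl
        rw [e1, e2]
        have hsplit : l.filterMap pvPair
            = (l.take (l.length / 2)).filterMap pvPair
              ++ (l.drop (l.length / 2)).filterMap pvPair := by
          rw [← List.filterMap_append, List.take_append_drop]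
        simp [hsplit]

-- ===== VERDICT (by name: the statement is the Claim_ definition above) =====
theorem color_separator_spec : Claim_equal_color_separator := by
  intro color_list _
  unfold Spec_color_separator color_separator
  rw [pv_foldl_eq, pv_alt_eq color_list.length color_list rfl]
  simp
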